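-- pv_equiv track=rewrite | github.com/manaswinichilla/Artificial-Intelligence-Assignment-3 | part1/pikachu.py | check_front_of_white_back_of_black_pikachu
-- ===== SOURCE A (Python) =====
-- import copy
--
-- def check_front_of_white_back_of_black_pikachu(pickachu, board_2d, row, col):
--     successor_pikachu_list_front = []
--
--     board_2d_front = copy.deepcopy(board_2d)
--     pickachu_row = row
--     if pickachu == board_2d[row][col]:
--         for rows in range(row - 1, -1, -1):
--
--             if board_2d_front[rows][col] == "." and pickachu == board_2d_front[rows + 1][
--                 col] and pickachu_row == rows + 1:
--                 board_2d_front = copy.deepcopy(board_2d_front)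
--                 board_2d_front[rows][col], board_2d_front[rows + 1][col] = board_2d_front[rows + 1][col], \
--                                                                            board_2d_front[rows][col]
--                 pickachu_row = rows  # without this if there are more than 2 pikachu then the new boarch gives duplicate boards
--                 # so I keep track of the original pikachu I am working at the moment and its updated locations
--
--                 successor_pikachu_list_front.append((board_2d_front, row, col, pickachu_row, col))
--
--
--     return successor_pikachu_list_front
-- ===== SOURCE B (Python) =====
-- import copy
--
-- def check_front_of_white_back_of_black_pikachu(pickachu, board_2d, row, col):
--     # Two-pass: scan upward for the contiguous run of empty cells, then build
--     # each successor as a fresh copy of the ORIGINAL board.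
--     results = []
--     if pickachu == board_2d[row][col]:
--         stop = row
--         r = row - 1
--         while r >= 0 and board_2d[r][col] == ".":
--             stop = r
--             r -= 1
--         for target in range(row - 1, stop - 1, -1):
--             new_board = copy.deepcopy(board_2d)
--             new_board[row][col] = "."
--             new_board[target][col] = pickachu
--             results.append((new_board, row, col, target, col))
--     return results
-- ===== Notes on version B (the rewrite author's own statement) =====
-- stated objective: alternative
-- what changed: A deep-copies and mutates a running board while folding over every row above (tracking the piece's current row to gate further swaps); B first scans upward once to find the end of the contiguous empty run, then builds each successor independently as a fresh copy of the original board with the two cells rewritten.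
import Mathlib
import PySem

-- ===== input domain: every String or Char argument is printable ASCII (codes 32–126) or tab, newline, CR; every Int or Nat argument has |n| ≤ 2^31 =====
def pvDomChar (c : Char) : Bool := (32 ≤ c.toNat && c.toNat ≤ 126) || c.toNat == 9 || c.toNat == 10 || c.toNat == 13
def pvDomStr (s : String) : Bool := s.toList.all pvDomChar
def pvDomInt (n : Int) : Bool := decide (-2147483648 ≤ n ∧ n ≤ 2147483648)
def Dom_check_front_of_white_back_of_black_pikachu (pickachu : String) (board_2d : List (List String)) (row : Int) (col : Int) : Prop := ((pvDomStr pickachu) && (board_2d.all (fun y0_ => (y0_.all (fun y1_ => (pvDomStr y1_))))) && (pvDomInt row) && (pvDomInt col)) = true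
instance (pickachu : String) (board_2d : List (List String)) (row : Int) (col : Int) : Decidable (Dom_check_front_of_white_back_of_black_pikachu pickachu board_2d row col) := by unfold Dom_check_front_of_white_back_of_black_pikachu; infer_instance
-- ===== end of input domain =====

-- B replaces A's step-by-step board mutation with a two-pass scheme: scan the empty run once,
-- then build each successor fresh from the original board (objective: alternative decomposition).
-- Neither implementation mutates its arguments; equivalence is about the return value.

-- shared low-level Python indexing helpers (2-D read b[i][j] and write b[i][j] = v)
def pvGet2 (b : List (List String)) (i j : Int) : Option String :=
  (PySem.List.pyGet? b i).bind (fun rl => PySem.List.pyGet? rl j)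

def pvSet2 (b : List (List String)) (i j : Int) (v : String) : List (List String) :=
  PySem.List.pySetD b i (PySem.List.pySetD (PySem.List.pyGetD b i []) j v)

-- ===== PORT A =====
-- the body of A's for-loop (state = (successor list, board_2d_front, pickachu_row))
def pvStepA (pickachu : String) (row col : Int)
    (st : List (List (List String) × Int × Int × Int × Int) × List (List String) × Int)
    (rows : Int) : List (List (List String) × Int × Int × Int × Int) × List (List String) × Int :=
  if pvGet2 st.2.1 rows col = some "." ∧ pvGet2 st.2.1 (rows + 1) col = some pickachu ∧ st.2.2 = rows + 1 then
    let t1 := PySem.List.pyGetD (PySem.List.pyGetD st.2.1 (rows + 1) []) col ""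
    let t2 := PySem.List.pyGetD (PySem.List.pyGetD st.2.1 rows []) col ""
    let bf' := pvSet2 (pvSet2 st.2.1 rows col t1) (rows + 1) col t2
    (st.1 ++ [(bf', row, col, rows, col)], bf', rows)
  else st

def check_front_of_white_back_of_black_pikachu (pickachu : String) (board_2d : List (List String)) (row : Int) (col : Int) : List (List (List String) × Int × Int × Int × Int) :=
  match pvGet2 board_2d row col with
  | none => []   -- Python raises IndexError here; excluded by Pre_
  | some cell =>
    if pickachu = cell then
      ((PySem.List.pyRange (row - 1) (-1) (-1)).foldl (pvStepA pickachu row col)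
        ([], board_2d, row)).1
    else []

-- ===== PORT B =====
-- the while-loop of Source B: scan upward while the cell is "."; returns the last row reached
def pvScanStop (board : List (List String)) (col : Int) (stop r : Int) : Int :=
  if h : 0 ≤ r ∧ pvGet2 board r col = some "." then pvScanStop board col r (r - 1) else stop
termination_by (r + 1).toNat
decreasing_by omega

def check_front_of_white_back_of_black_pikachu_alt (pickachu : String) (board_2d : List (List String)) (row : Int) (col : Int) : List (List (List String) × Int × Int × Int × Int) :=
  match pvGet2 board_2d row col with
  | none => []   -- Python raises IndexError here; excluded by Pre_
  | some cell =>
    if pickachu = cell then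
      let stop := pvScanStop board_2d col row (row - 1)
      (PySem.List.pyRange (row - 1) (stop - 1) (-1)).map (fun target =>
        (pvSet2 (pvSet2 board_2d row col ".") target col pickachu, row, col, target, col))
    else []

-- ===== PRECONDITION & SPEC =====
-- Pre_ excludes exactly the inputs on which Python A raises IndexError: (row, col) must be a
-- valid (possibly negative) 2-D index, and — when the piece really sits at (row, col), so that
-- the loop runs — col must be a valid index in every row above, since A reads each of them.
def Pre_check_front_of_white_back_of_black_pikachu (pickachu : String) (board_2d : List (List String)) (row : Int) (col : Int) : Prop :=
  PySem.Raise.InRange board_2d.length row ∧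
  PySem.Raise.InRange (PySem.List.pyGetD board_2d row []).length col ∧
  (pickachu = PySem.List.pyGetD (PySem.List.pyGetD board_2d row []) col "" →
    ∀ r : Nat, r < row.toNat → PySem.Raise.InRange (board_2d.getD r []).length col)

instance (pickachu : String) (board_2d : List (List String)) (row : Int) (col : Int) : Decidable (Pre_check_front_of_white_back_of_black_pikachu pickachu board_2d row col) := by unfold Pre_check_front_of_white_back_of_black_pikachu; infer_instance

def pvWitness_check_front_of_white_back_of_black_pikachu : String × List (List String) × Int × Int :=
  ("w", [["."], ["w"]], 1, 0)

def Spec_check_front_of_white_back_of_black_pikachu (pickachu : String) (board_2d : List (List String)) (row : Int) (col : Int) (out : List (List (List String) × Int × Int × Int × Int)) : Prop := out = check_front_of_white_back_of_black_pikachu_alt pickachu board_2d row col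
instance (pickachu : String) (board_2d : List (List String)) (row : Int) (col : Int) (out : List (List (List String) × Int × Int × Int × Int)) : Decidable (Spec_check_front_of_white_back_of_black_pikachu pickachu board_2d row col out) := by unfold Spec_check_front_of_white_back_of_black_pikachu; infer_instance

-- ===== CLAIM (what is proved, stated in full; the proofs are below) =====
def Claim_equal_check_front_of_white_back_of_black_pikachu : Prop := ∀ (pickachu : String) (board_2d : List (List String)) (row : Int) (col : Int), Dom_check_front_of_white_back_of_black_pikachu pickachu board_2d row col → Pre_check_front_of_white_back_of_black_pikachu pickachu board_2d row col → Spec_check_front_of_white_back_of_black_pikachu pickachu board_2d row col (check_front_of_white_back_of_black_pikachu pickachu board_2d row col)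

-- ===== LEMMAS AND PROOFS =====

-- index-resolution toolkit ---------------------------------------------------

theorem pv_exists_idx (n : Nat) (j : Int) (h : PySem.Raise.InRange n j) :
    ∃ k : Nat, PySem.List.pyIdx? n j = some k ∧ k < n := by
  obtain ⟨h1, h2⟩ := h
  unfold PySem.List.pyIdx?
  by_cases h0 : 0 ≤ j
  · exact ⟨j.toNat, by simp [h0, h2], by omega⟩
  · exact ⟨n - (-j).toNat, by simp [h0, h1], by omega⟩

theorem pv_pyGet?_of_idx {α : Type} (l : List α) (j : Int) (k : Nat)
    (hk : PySem.List.pyIdx? l.length j = some k) :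
    PySem.List.pyGet? l j = l[k]? := by
  simp [PySem.List.pyGet?, hk]

theorem pv_pySetD_of_idx {α : Type} (l : List α) (j : Int) (v : α) (k : Nat)
    (hk : PySem.List.pyIdx? l.length j = some k) :
    PySem.List.pySetD l j v = l.set k v := by
  simp [PySem.List.pySetD, PySem.List.pySet?, hk]

theorem pv_pySetD_collapse {α : Type} (l : List α) (j : Int) (v w : α) :
    PySem.List.pySetD (PySem.List.pySetD l j v) j w = PySem.List.pySetD l j w := by
  by_cases h : PySem.Raise.InRange l.length j
  · obtain ⟨k, hk, hkn⟩ := pv_exists_idx l.length j h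
    rw [pv_pySetD_of_idx l j v k hk, pv_pySetD_of_idx _ j w k (by simpa using hk),
        pv_pySetD_of_idx l j w k hk, List.set_set]
  · have hn : PySem.List.pySet? l j v = none := by
      rw [PySem.List.pySet?_eq_none_iff]; exact h
    have : PySem.List.pySetD l j v = l := by simp [PySem.List.pySetD, hn]
    rw [this]

theorem pv_pySetD_get_self {α : Type} (l : List α) (j : Int) (d : α)
    (h : PySem.Raise.InRange l.length j) :
    PySem.List.pySetD l j (PySem.List.pyGetD l j d) = l := by
  obtain ⟨k, hk, hkn⟩ := pv_exists_idx l.length j h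
  rw [pv_pySetD_of_idx l j _ k hk]
  have : PySem.List.pyGetD l j d = l[k] := by
    simp [PySem.List.pyGetD, pv_pyGet?_of_idx l j k hk, List.getElem?_eq_getElem hkn]
  rw [this, List.set_getElem_self]

theorem pv_pyGet?_pySetD_self {α : Type} (l : List α) (j : Int) (v : α)
    (h : PySem.Raise.InRange l.length j) :
    PySem.List.pyGet? (PySem.List.pySetD l j v) j = some v := by
  obtain ⟨k, hk, hkn⟩ := pv_exists_idx l.length j h
  rw [pv_pySetD_of_idx l j v k hk, pv_pyGet?_of_idx _ j k (by simpa using hk)]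
  simp [hkn]

-- pvGet2 / pvSet2 algebra ----------------------------------------------------

theorem pvGet2_inRange (b : List (List String)) (i j : Int) (c : String)
    (h : pvGet2 b i j = some c) :
    PySem.Raise.InRange b.length i ∧
      PySem.Raise.InRange (PySem.List.pyGetD b i []).length j := by
  unfold pvGet2 at h
  cases hrow : PySem.List.pyGet? b i with
  | none => rw [hrow] at h; simp at h
  | some rl =>
    rw [hrow] at h; simp at h
    refine ⟨?_, ?_⟩
    · by_contra hc
      rw [← PySem.List.pyGet?_eq_none_iff] at hc
      rw [hc] at hrow; exact absurd hrow (by simp)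
    · have : PySem.List.pyGetD b i [] = rl := by simp [PySem.List.pyGetD, hrow]
      rw [this]
      by_contra hc
      rw [← PySem.List.pyGet?_eq_none_iff] at hc
      rw [hc] at h; exact absurd h (by simp)

theorem pvGet2_eq_getD (b : List (List String)) (i j : Int) (c : String)
    (h : pvGet2 b i j = some c) :
    PySem.List.pyGetD (PySem.List.pyGetD b i []) j "" = c := by
  unfold pvGet2 at h
  cases hrow : PySem.List.pyGet? b i with
  | none => rw [hrow] at h; simp at h
  | some rl =>
    rw [hrow] at h; simp at h
    have : PySem.List.pyGetD b i [] = rl := by simp [PySem.List.pyGetD, hrow]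
    rw [this]
    simp [PySem.List.pyGetD, h]

theorem pv_getD_some (b : List (List String)) (i j : Int)
    (hi : PySem.Raise.InRange b.length i)
    (hj : PySem.Raise.InRange (PySem.List.pyGetD b i []).length j) :
    pvGet2 b i j = some (PySem.List.pyGetD (PySem.List.pyGetD b i []) j "") := by
  obtain ⟨ki, hki, hkin⟩ := pv_exists_idx b.length i hi
  have hrow : PySem.List.pyGet? b i = some b[ki] := by
    rw [pv_pyGet?_of_idx b i ki hki, List.getElem?_eq_getElem hkin]
  have hrowD : PySem.List.pyGetD b i [] = b[ki] := by simp [PySem.List.pyGetD, hrow]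
  rw [hrowD] at hj
  obtain ⟨kj, hkj, hkjn⟩ := pv_exists_idx _ j hj
  unfold pvGet2
  rw [hrow, hrowD]
  simp [pv_pyGet?_of_idx _ j kj hkj, PySem.List.pyGetD, List.getElem?_eq_getElem hkjn]

theorem pvSet2_length (b : List (List String)) (i j : Int) (v : String) :
    (pvSet2 b i j v).length = b.length := by
  simp [pvSet2, PySem.List.length_pySetD]

theorem pv_pyGet?_set_ne {α : Type} (b : List α) (k : Nat) (rl : α) (i' : Int)
    (hi' : 0 ≤ i') (hne : k ≠ i'.toNat) :
    PySem.List.pyGet? (b.set k rl) i' = PySem.List.pyGet? b i' := by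
  rw [PySem.List.pyGet?_of_nonneg _ hi', PySem.List.pyGet?_of_nonneg _ hi',
      List.getElem?_set_ne hne]

theorem pv_row_pvSet2_ne (b : List (List String)) (i i' j : Int) (v : String)
    (hi : 0 ≤ i) (hi' : 0 ≤ i') (hne : i ≠ i') :
    PySem.List.pyGet? (pvSet2 b i j v) i' = PySem.List.pyGet? b i' := by
  unfold pvSet2
  rw [PySem.List.pySetD_of_nonneg _ _ hi]
  exact pv_pyGet?_set_ne b i.toNat _ i' hi' (by omega)

theorem pvGet2_pvSet2_ne (b : List (List String)) (i i' j j' : Int) (v : String)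
    (hi : 0 ≤ i) (hi' : 0 ≤ i') (hne : i ≠ i') :
    pvGet2 (pvSet2 b i j v) i' j' = pvGet2 b i' j' := by
  unfold pvGet2
  rw [pv_row_pvSet2_ne b i i' j v hi hi' hne]

theorem pvGet2_pvSet2_self (b : List (List String)) (i j : Int) (v : String)
    (hi : PySem.Raise.InRange b.length i) (hi0 : 0 ≤ i)
    (hj : PySem.Raise.InRange (PySem.List.pyGetD b i []).length j) :
    pvGet2 (pvSet2 b i j v) i j = some v := by
  unfold pvSet2 pvGet2
  rw [PySem.List.pySetD_of_nonneg _ _ hi0]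
  obtain ⟨hi1, hi2⟩ := hi
  have hlt : i.toNat < b.length := by omega
  have hrow : PySem.List.pyGet? (b.set i.toNat (PySem.List.pySetD (PySem.List.pyGetD b i []) j v)) i =
      some (PySem.List.pySetD (PySem.List.pyGetD b i []) j v) := by
    unfold PySem.List.pyGet? PySem.List.pyIdx?
    simp [hi0, List.length_set, hi2, hlt]
  rw [hrow]
  simp only [Option.bind_some]
  exact pv_pyGet?_pySetD_self _ j v hj

theorem pvSet2_comm (b : List (List String)) (i i' j j' : Int) (v w : String)
    (hi : 0 ≤ i) (hi' : 0 ≤ i') (hne : i ≠ i') :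
    pvSet2 (pvSet2 b i j v) i' j' w = pvSet2 (pvSet2 b i' j' w) i j v := by
  have hrow1 : PySem.List.pyGetD (pvSet2 b i j v) i' [] = PySem.List.pyGetD b i' [] := by
    unfold PySem.List.pyGetD
    rw [pv_row_pvSet2_ne b i i' j v hi hi' hne]
  have hrow2 : PySem.List.pyGetD (pvSet2 b i' j' w) i [] = PySem.List.pyGetD b i [] := by
    unfold PySem.List.pyGetD
    rw [pv_row_pvSet2_ne b i' i j' w hi' hi (Ne.symm hne)]
  conv_lhs => rw [pvSet2, hrow1]
  conv_rhs => rw [pvSet2, hrow2]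
  unfold pvSet2
  rw [PySem.List.pySetD_of_nonneg _ _ hi, PySem.List.pySetD_of_nonneg _ _ hi',
      PySem.List.pySetD_of_nonneg _ _ hi', PySem.List.pySetD_of_nonneg _ _ hi]
  exact List.set_comm _ _ (by omega)

theorem pvSet2_collapse (b : List (List String)) (i j : Int) (v w : String)
    (hi : 0 ≤ i) :
    pvSet2 (pvSet2 b i j v) i j w = pvSet2 b i j w := by
  by_cases hlt : i.toNat < b.length
  · have hrow : PySem.List.pyGetD (pvSet2 b i j v) i [] =
        PySem.List.pySetD (PySem.List.pyGetD b i []) j v := by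
      unfold pvSet2 PySem.List.pyGetD
      rw [PySem.List.pySetD_of_nonneg _ _ hi]
      unfold PySem.List.pyGet? PySem.List.pyIdx?
      simp [hi, List.length_set, hlt, show i < (b.length : Int) by omega]
    conv_lhs => rw [pvSet2, hrow, pv_pySetD_collapse]
    unfold pvSet2
    rw [PySem.List.pySetD_of_nonneg _ _ hi, PySem.List.pySetD_of_nonneg _ _ hi,
        PySem.List.pySetD_of_nonneg _ _ hi, List.set_set]
  · have heq : ∀ u : String, pvSet2 b i j u = b := by
      intro u
      unfold pvSet2
      rw [PySem.List.pySetD_of_nonneg _ _ hi]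
      exact List.set_eq_of_length_le (by omega)
    rw [heq, heq]

theorem pvSet2_noop (b : List (List String)) (i j : Int) (v : String)
    (h : pvGet2 b i j = some v) :
    pvSet2 b i j v = b := by
  obtain ⟨hi, hj⟩ := pvGet2_inRange b i j v h
  have hv : PySem.List.pyGetD (PySem.List.pyGetD b i []) j "" = v := pvGet2_eq_getD b i j v h
  unfold pvSet2
  rw [← hv, pv_pySetD_get_self _ j "" hj]
  obtain ⟨k, hk, hkn⟩ := pv_exists_idx b.length i hi
  rw [pv_pySetD_of_idx b i _ k hk]
  have : PySem.List.pyGetD b i [] = b[k] := by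
    simp [PySem.List.pyGetD, pv_pyGet?_of_idx b i k hk, List.getElem?_eq_getElem hkn]
  rw [this, List.set_getElem_self]

-- countdown-range utilities --------------------------------------------------

theorem pvRange_append (a b c : Int) (hcb : c ≤ b) (hba : b ≤ a) :
    PySem.List.pyRange a c (-1) = PySem.List.pyRange a b (-1) ++ PySem.List.pyRange b c (-1) := by
  have h : ∀ n : Nat, ∀ a : Int, b ≤ a → (a - b).toNat = n →
      PySem.List.pyRange a c (-1) = PySem.List.pyRange a b (-1) ++ PySem.List.pyRange b c (-1) := by
    intro n
    induction n with
    | zero =>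
      intro a hba h0
      have : a = b := by omega
      subst this
      rw [PySem.List.pyRange_neg_one_eq_nil (le_refl a)]
      simp
    | succ m ih =>
      intro a hba h0
      have hlt : b < a := by omega
      rw [PySem.List.pyRange_neg_one_cons (show c < a by omega),
          PySem.List.pyRange_neg_one_cons hlt,
          ih (a - 1) (by omega) (by omega)]
      simp
  exact h (a - b).toNat a hba rfl

theorem pv_foldl_fixed {α β : Type} (f : β → α → β) (s : β) (l : List α)
    (h : ∀ x ∈ l, f s x = s) : l.foldl f s = s := by
  induction l with
  | nil => rfl
  | cons y ys ih =>
    simp only [List.foldl_cons, h y (by simp)]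
    exact ih (fun x hx => h x (by simp [hx]))

-- scan characterisation ------------------------------------------------------

theorem pvScan_props (board : List (List String)) (col : Int) :
    ∀ (n : Nat) (r : Int), (r + 1).toNat ≤ n →
      pvScanStop board col (r + 1) r ≤ r + 1 ∧
      (0 ≤ r + 1 → 0 ≤ pvScanStop board col (r + 1) r) ∧
      (∀ x : Int, pvScanStop board col (r + 1) r ≤ x → x ≤ r → pvGet2 board x col = some ".") ∧
      ¬ (0 ≤ pvScanStop board col (r + 1) r - 1 ∧
          pvGet2 board (pvScanStop board col (r + 1) r - 1) col = some ".") := by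
  intro n
  induction n with
  | zero =>
    intro r hr
    have hneg : ¬ (0 ≤ r ∧ pvGet2 board r col = some ".") := by
      intro ⟨h0, _⟩; omega
    rw [pvScanStop, dif_neg hneg]
    refine ⟨le_refl _, fun h => h, fun x hx1 hx2 => ?_, fun ⟨h1, _⟩ => by omega⟩
    omega
  | succ m ih =>
    intro r hr
    by_cases hc : 0 ≤ r ∧ pvGet2 board r col = some "."
    · rw [pvScanStop, dif_pos hc]
      have := ih (r - 1) (by omega)
      rw [show r - 1 + 1 = r by ring] at this
      obtain ⟨p1, p2, p3, p4⟩ := this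
      refine ⟨by omega, fun _ => p2 (by omega), fun x hx1 hx2 => ?_, p4⟩
      by_cases hxr : x = r
      · rw [hxr]; exact hc.2
      · exact p3 x hx1 (by omega)
    · rw [pvScanStop, dif_neg hc]
      refine ⟨le_refl _, fun h => h, fun x hx1 hx2 => ?_, fun ⟨h1, h2⟩ => ?_⟩
      · omega
      · simp only [add_sub_cancel_right] at h1 h2
        exact hc ⟨h1, h2⟩

-- the moved board: the original with (row,col) emptied and (t,col) holding the piece
def pvMoved (board : List (List String)) (row col t : Int) (pickachu : String) : List (List String) :=
  pvSet2 (pvSet2 board row col ".") t col pickachu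

-- main fold lemmas -----------------------------------------------------------

theorem pv_pyGetD_nonneg_eq_getD {α : Type} (b : List α) (t : Int) (d : α) (h : 0 ≤ t) :
    PySem.List.pyGetD b t d = b.getD t.toNat d := by
  simp [PySem.List.pyGetD, PySem.List.pyGet?_of_nonneg b h, List.getD_eq_getElem?_getD]

theorem pvRowD_pvSet2_ne (b : List (List String)) (i i' j : Int) (v : String)
    (hi : 0 ≤ i) (hi' : 0 ≤ i') (hne : i ≠ i') :
    PySem.List.pyGetD (pvSet2 b i j v) i' [] = PySem.List.pyGetD b i' [] := by
  unfold PySem.List.pyGetD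
  rw [pv_row_pvSet2_ne b i i' j v hi hi' hne]

theorem pv_phase1 (pickachu : String) (board : List (List String)) (row col : Int)
    (hrow1 : 1 ≤ row)
    (hInR : PySem.Raise.InRange board.length row)
    (hguard : pvGet2 board row col = some pickachu)
    (hcolsI : ∀ x : Int, 0 ≤ x → x < row → PySem.Raise.InRange (PySem.List.pyGetD board x []).length col) :
    ∀ (n : Nat) (t stop : Int), (t - stop).toNat ≤ n → 0 ≤ stop → stop ≤ t → t ≤ row →
    (∀ x : Int, stop ≤ x → x < row → pvGet2 board x col = some ".") →
    (PySem.List.pyRange (t - 1) (stop - 1) (-1)).foldl (pvStepA pickachu row col)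
      ((PySem.List.pyRange (row - 1) (t - 1) (-1)).map
        (fun target => (pvMoved board row col target pickachu, row, col, target, col)),
       pvMoved board row col t pickachu, t)
    = ((PySem.List.pyRange (row - 1) (stop - 1) (-1)).map
        (fun target => (pvMoved board row col target pickachu, row, col, target, col)),
       pvMoved board row col stop pickachu, stop) := by
  have hrow0 : (0 : Int) ≤ row := by omega
  have hjInR : PySem.Raise.InRange (PySem.List.pyGetD board row []).length col :=
    (pvGet2_inRange board row col pickachu hguard).2
  -- col is a valid index of every row of S = board with (row,col) emptied, up to row
  have hSlen : ∀ x : Int, 0 ≤ x → x ≤ row →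
      PySem.Raise.InRange (PySem.List.pyGetD (pvSet2 board row col ".") x []).length col := by
    intro x hx0 hxr
    by_cases hxrow : x = row
    · subst hxrow
      have : PySem.List.pyGetD (pvSet2 board x col ".") x [] =
          PySem.List.pySetD (PySem.List.pyGetD board x []) col "." := by
        unfold pvSet2 PySem.List.pyGetD
        rw [PySem.List.pySetD_of_nonneg _ _ hx0, PySem.List.pyGet?_of_nonneg _ hx0]
        obtain ⟨h1, h2⟩ := hInR
        rw [List.getElem?_set_self (by omega)]
        rfl
      rw [this, PySem.List.length_pySetD]
      exact hjInR
    · rw [pvRowD_pvSet2_ne board row x col "." hrow0 hx0 (fun h => hxrow h.symm)]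
      exact hcolsI x hx0 (by omega)
  have hSInR : ∀ x : Int, 0 ≤ x → x ≤ row →
      PySem.Raise.InRange (pvSet2 board row col ".").length x := by
    intro x hx0 hxr
    rw [pvSet2_length]
    obtain ⟨h1, h2⟩ := hInR
    constructor <;> omega
  -- the piece sits at (t, col) of the moved board
  have hMt : ∀ t : Int, 0 ≤ t → t ≤ row →
      pvGet2 (pvMoved board row col t pickachu) t col = some pickachu := by
    intro t ht0 htr
    exact pvGet2_pvSet2_self _ t col pickachu (hSInR t ht0 htr) ht0 (hSlen t ht0 htr)
  intro n
  induction n with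
  | zero =>
    intro t stop hn h0 hst htr hrun
    have : t = stop := by omega
    subst this
    rw [PySem.List.pyRange_neg_one_eq_nil (le_refl (t - 1))]
    rfl
  | succ m ih =>
    intro t stop hn h0 hst htr hrun
    by_cases hts : t = stop
    · subst hts
      rw [PySem.List.pyRange_neg_one_eq_nil (le_refl (t - 1))]
      rfl
    · have hlt : stop < t := by omega
      have ht0 : (0 : Int) ≤ t := by omega
      have ht10 : (0 : Int) ≤ t - 1 := by omega
      -- the three conjuncts of A's branch condition at rows = t - 1
      have hc1 : pvGet2 (pvMoved board row col t pickachu) (t - 1) col = some "." := by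
        unfold pvMoved
        rw [pvGet2_pvSet2_ne _ t (t - 1) col col pickachu ht0 ht10 (by omega),
            pvGet2_pvSet2_ne _ row (t - 1) col col "." hrow0 ht10 (by omega)]
        exact hrun (t - 1) (by omega) (by omega)
      have hc2 : pvGet2 (pvMoved board row col t pickachu) t col = some pickachu :=
        hMt t ht0 htr
      -- the swapped board is the board moved one step further
      have hbf : pvSet2 (pvSet2 (pvMoved board row col t pickachu) (t - 1) col pickachu) t col "."
          = pvMoved board row col (t - 1) pickachu := by
        unfold pvMoved
        rw [pvSet2_comm _ t (t - 1) col col pickachu pickachu ht0 ht10 (by omega),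
            pvSet2_collapse _ t col pickachu "." ht0]
        apply pvSet2_noop _ t col "."
        rw [pvGet2_pvSet2_ne _ (t - 1) t col col pickachu ht10 ht0 (by omega)]
        by_cases htrow : t = row
        · subst htrow
          exact pvGet2_pvSet2_self board t col "." hInR ht0 hjInR
        · rw [pvGet2_pvSet2_ne _ row t col col "." hrow0 ht0 (fun h => htrow h.symm)]
          exact hrun t (by omega) (by omega)
      -- the successor list grows by exactly the board for target t - 1
      have hacc : (PySem.List.pyRange (row - 1) (t - 1) (-1)).map
            (fun target => (pvMoved board row col target pickachu, row, col, target, col))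
            ++ [(pvMoved board row col (t - 1) pickachu, row, col, t - 1, col)]
          = (PySem.List.pyRange (row - 1) (t - 1 - 1) (-1)).map
            (fun target => (pvMoved board row col target pickachu, row, col, target, col)) := by
        rw [pvRange_append (row - 1) (t - 1) (t - 1 - 1) (by omega) (by omega),
            PySem.List.pyRange_neg_one_cons (show t - 1 - 1 < t - 1 by omega),
            PySem.List.pyRange_neg_one_eq_nil (show t - 1 - 1 ≤ t - 1 - 1 by omega)]
        simp
      rw [PySem.List.pyRange_neg_one_cons (show stop - 1 < t - 1 by omega)]
      simp only [List.foldl_cons]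
      have hstep : pvStepA pickachu row col
          ((PySem.List.pyRange (row - 1) (t - 1) (-1)).map
            (fun target => (pvMoved board row col target pickachu, row, col, target, col)),
           pvMoved board row col t pickachu, t) (t - 1)
          = ((PySem.List.pyRange (row - 1) (t - 1 - 1) (-1)).map
            (fun target => (pvMoved board row col target pickachu, row, col, target, col)),
           pvMoved board row col (t - 1) pickachu, t - 1) := by
        unfold pvStepA
        rw [show t - 1 + 1 = t by ring]
        rw [if_pos ⟨hc1, hc2, rfl⟩]
        simp only [pvGet2_eq_getD _ _ _ _ hc1, pvGet2_eq_getD _ _ _ _ hc2, hbf, hacc]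
      rw [hstep]
      exact ih (t - 1) stop (by omega) h0 (by omega) (by omega) hrun

theorem pv_phase2 (pickachu : String) (board : List (List String)) (row col stop : Int)
    (acc : List (List (List String) × Int × Int × Int × Int))
    (hrow0 : 0 ≤ row) (h0 : 0 ≤ stop) (hsr : stop ≤ row)
    (hstopped : ¬ (0 ≤ stop - 1 ∧ pvGet2 board (stop - 1) col = some ".")) :
    (PySem.List.pyRange (stop - 1) (-1) (-1)).foldl (pvStepA pickachu row col)
      (acc, pvMoved board row col stop pickachu, stop)
    = (acc, pvMoved board row col stop pickachu, stop) := by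
  apply pv_foldl_fixed
  intro x hx
  rw [PySem.List.mem_pyRange_neg_one] at hx
  unfold pvStepA
  rw [if_neg]
  rintro ⟨c1, _, c3⟩
  -- c3 : stop = x + 1, so x = stop - 1 and c1 reads the cell just above the run
  have c3' : stop = x + 1 := c3
  have hxs : x = stop - 1 := by omega
  subst hxs
  apply hstopped
  refine ⟨by omega, ?_⟩
  unfold pvMoved at c1
  rw [pvGet2_pvSet2_ne _ stop (stop - 1) col col pickachu h0 (by omega) (by omega),
      pvGet2_pvSet2_ne _ row (stop - 1) col col "." hrow0 (by omega) (by omega)] at c1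
  exact c1

-- ===== VERDICT (by name: the statement is the Claim_ definition above) =====
theorem check_front_of_white_back_of_black_pikachu_spec : Claim_equal_check_front_of_white_back_of_black_pikachu := by
  intro pickachu board row col _dom hpre
  obtain ⟨hInR, hjInR, hcols⟩ := hpre
  unfold Spec_check_front_of_white_back_of_black_pikachu
  unfold check_front_of_white_back_of_black_pikachu check_front_of_white_back_of_black_pikachu_alt
  have hsome : pvGet2 board row col =
      some (PySem.List.pyGetD (PySem.List.pyGetD board row []) col "") :=
    pv_getD_some board row col hInR hjInR
  simp only [hsome]
  by_cases hpk : pickachu = PySem.List.pyGetD (PySem.List.pyGetD board row []) col ""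
  · simp only [if_pos hpk]
    have hguard : pvGet2 board row col = some pickachu := by rw [hsome, hpk]
    by_cases hr1 : 1 ≤ row
    · have hrow0 : (0 : Int) ≤ row := by omega
      have hcolsI : ∀ x : Int, 0 ≤ x → x < row →
          PySem.Raise.InRange (PySem.List.pyGetD board x []).length col := by
        intro x hx0 hxr
        rw [pv_pyGetD_nonneg_eq_getD board x [] hx0]
        exact hcols hpk x.toNat (by omega)
      have hscan := pvScan_props board col (row + 1).toNat (row - 1) (by omega)
      rw [show row - 1 + 1 = row by ring] at hscan
      obtain ⟨p1, p2, p3, p4⟩ := hscan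
      have hs0 : 0 ≤ pvScanStop board col row (row - 1) := p2 (by omega)
      set stop := pvScanStop board col row (row - 1) with hstopdef
      have hMrow : pvMoved board row col row pickachu = board := by
        unfold pvMoved
        rw [pvSet2_collapse board row col "." pickachu hrow0]
        exact pvSet2_noop board row col pickachu hguard
      have h1 := pv_phase1 pickachu board row col hr1 hInR hguard hcolsI
        (row - stop).toNat row stop (le_refl _) hs0 (by omega) (le_refl row)
        (fun x hx1 hx2 => p3 x hx1 (by omega))
      rw [PySem.List.pyRange_neg_one_eq_nil (le_refl (row - 1)), List.map_nil, hMrow] at h1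
      rw [pvRange_append (row - 1) (stop - 1) (-1) (by omega) (by omega), List.foldl_append,
          h1, pv_phase2 pickachu board row col stop _ hrow0 hs0 (by omega) p4]
      rfl
    · have hstop0 : pvScanStop board col row (row - 1) = row := by
        rw [pvScanStop]
        exact dif_neg (fun h => by omega)
      rw [PySem.List.pyRange_neg_one_eq_nil (show row - 1 ≤ -1 by omega)]
      simp only [hstop0, List.foldl_nil,
        PySem.List.pyRange_neg_one_eq_nil (le_refl (row - 1)), List.map_nil]
  · simp only [if_neg hpk]
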